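-- pv_equiv track=rewrite | github.com/ilhaniskurt/proj201 | beta/logic.py | fixDuplicates
-- ===== SOURCE A (Python) =====
-- def fixDuplicates(courses:dict, duplicates:dict):
--     fixedDict = courses
--     for course, conditions in courses.items():
--         if course in duplicates.keys():
--             for duplicate in duplicates[course]:
--                 res = [i for i in range(len(conditions)) if conditions.startswith(duplicate, i)]
--                 if len(res) == 2:
--                     fixedDict[course] = conditions[:res[0]] + conditions[res[1]:]
--     return fixedDict
-- ===== SOURCE B (Python) =====
-- # Rabin-Karp re-implementation: occurrence positions of each duplicate substring are
-- # found with a rolling polynomial hash over a sliding window (only hash-equal windows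
-- # are verified), instead of A's startswith test at every index. Like A, mutates
-- # `courses` in place and returns it.
--
-- _M = (1 << 61) - 1   # Mersenne prime modulus
-- _B = 131             # hash base
--
-- def _occurrences(s, d):
--     """All (overlapping) start positions i in range(len(s)) with s.startswith(d, i)."""
--     m, n = len(d), len(s)
--     if m == 0:
--         return list(range(n))
--     if n < m:
--         return []
--     hd = 0
--     for ch in d:
--         hd = (hd * _B + ord(ch)) % _M
--     h = 0
--     for ch in s[:m]:
--         h = (h * _B + ord(ch)) % _M
--     pw = pow(_B, m - 1, _M)
--     occ = []
--     for i in range(n - m + 1):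
--         if h == hd and s[i:i + m] == d:
--             occ.append(i)
--         if i + m < n:
--             h = ((h - ord(s[i]) * pw) * _B + ord(s[i + m])) % _M
--     return occ
--
-- def fixDuplicates(courses: dict, duplicates: dict):
--     for course, conditions in courses.items():
--         for dup in duplicates.get(course, []):
--             occ = _occurrences(conditions, dup)
--             if len(occ) == 2:
--                 courses[course] = conditions[:occ[0]] + conditions[occ[1]:]
--     return courses
-- ===== Notes on version B (the rewrite author's own statement) =====
-- stated objective: faster
-- what changed: Occurrence positions of each duplicate substring are found by Rabin-Karp: a rolling polynomial hash slides over the string and only windows whose hash equals the pattern's hash are verified by direct comparison, replacing A's startswith test at every index.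
import Mathlib
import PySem

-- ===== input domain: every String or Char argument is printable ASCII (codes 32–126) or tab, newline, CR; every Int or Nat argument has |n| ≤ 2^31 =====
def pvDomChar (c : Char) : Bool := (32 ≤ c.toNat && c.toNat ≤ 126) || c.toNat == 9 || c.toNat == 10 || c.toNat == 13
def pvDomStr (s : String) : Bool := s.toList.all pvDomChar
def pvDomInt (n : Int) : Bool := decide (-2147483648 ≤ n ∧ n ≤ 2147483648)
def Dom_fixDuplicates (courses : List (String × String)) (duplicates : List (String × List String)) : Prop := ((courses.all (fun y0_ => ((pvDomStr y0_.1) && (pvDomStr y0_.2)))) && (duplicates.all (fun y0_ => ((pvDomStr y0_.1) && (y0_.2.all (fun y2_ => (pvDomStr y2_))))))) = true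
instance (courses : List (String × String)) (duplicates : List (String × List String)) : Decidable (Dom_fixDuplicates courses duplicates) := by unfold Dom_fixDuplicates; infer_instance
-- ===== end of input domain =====

-- B finds the occurrence positions of each duplicate substring by Rabin-Karp (rolling
-- polynomial hash over a sliding window, direct comparison only on hash match) instead of
-- A's startswith test at every index; like A it mutates `courses` in place and returns it
-- (the theorems below are about the return value).

-- ===== PORT A =====
def fixDuplicates (courses : List (String × String)) (duplicates : List (String × List String)) : List (String × String) :=
  let dupDict := PySem.Dict.ofList duplicates
  -- fixedDict = courses; iterate over courses.items() (only the current key's value is ever overwritten)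
  ((PySem.Dict.ofList courses).items.foldl (fun fixed p =>
    match dupDict.get? p.1 with          -- `course in duplicates.keys()` / `duplicates[course]`
    | none => fixed
    | some ds => ds.foldl (fun fixed dup =>
        let res := (PySem.List.pyRange 0 (PySem.Str.len p.2) 1).filter
          (fun i => PySem.Str.startswith (PySem.Str.slice p.2 (some i) none) dup)  -- conditions.startswith(dup, i)
        if res.length == 2 then
          fixed.insert p.1 (PySem.Str.slice p.2 none (some (PySem.List.pyGetD res 0 0)) ++
                            PySem.Str.slice p.2 (some (PySem.List.pyGetD res 1 0)) none)
        else fixed) fixed)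
    (PySem.Dict.ofList courses)).items

-- ===== PORT B =====
def pvM : Int := 2305843009213693951   -- _M = (1 << 61) - 1
-- _B = 131 appears as the literal 131 below.

-- hd/h computation: for ch in l: h = (h * _B + ord(ch)) % _M
def pvHashF (h : Int) (cs : List Char) : Int :=
  cs.foldl (fun a c => PySem.Int.mod (a * 131 + (c.toNat : Int)) pvM) h

-- one iteration of Source B's `for i in range(n - m + 1)` loop, state = (h, occ);
-- s[i:i+m] == d is (s.drop i).take m == d and s[i] / s[i+m] are s.getD — exact here since
-- 0 ≤ i and i + m ≤ len(s) on every iteration.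
def pvRkStep (s d : List Char) (hd pw : Int) (st : Int × List Int) (i : Nat) : Int × List Int :=
  let occ := if st.1 == hd && ((s.drop i).take d.length == d) then st.2 ++ [(i : Int)] else st.2
  let h := if i + d.length < s.length then
      PySem.Int.mod ((st.1 - ((s.getD i ' ').toNat : Int) * pw) * 131 + ((s.getD (i + d.length) ' ').toNat : Int)) pvM
    else st.1
  (h, occ)

def pvOccurrences (s d : List Char) : List Int :=
  if d.length == 0 then PySem.List.pyRange 0 (s.length : Int) 1   -- list(range(n))
  else if s.length < d.length then []
  else
    -- hd, h (of s[:m]) and pw = pow(_B, m-1, _M) precomputed, then the sliding loop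
    ((List.range (s.length - d.length + 1)).foldl
      (pvRkStep s d (pvHashF 0 d) (PySem.Int.powMod 131 (d.length - 1) pvM))
      (pvHashF 0 (s.take d.length), ([] : List Int))).2

def fixDuplicates_alt (courses : List (String × String)) (duplicates : List (String × List String)) : List (String × String) :=
  let dupDict := PySem.Dict.ofList duplicates
  ((PySem.Dict.ofList courses).items.foldl (fun fixed p =>
    (dupDict.getD p.1 []).foldl (fun fixed dup =>
        let occ := pvOccurrences p.2.toList dup.toList
        if occ.length == 2 then
          fixed.insert p.1 (PySem.Str.slice p.2 none (some (PySem.List.pyGetD occ 0 0)) ++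
                            PySem.Str.slice p.2 (some (PySem.List.pyGetD occ 1 0)) none)
        else fixed) fixed)
    (PySem.Dict.ofList courses)).items

-- ===== PRECONDITION & SPEC =====
def Spec_fixDuplicates (courses : List (String × String)) (duplicates : List (String × List String)) (out : List (String × String)) : Prop := out = fixDuplicates_alt courses duplicates
instance (courses : List (String × String)) (duplicates : List (String × List String)) (out : List (String × String)) : Decidable (Spec_fixDuplicates courses duplicates out) := by unfold Spec_fixDuplicates; infer_instance

-- ===== CLAIM (what is proved, stated in full; the proofs are below) =====
def Claim_equal_fixDuplicates : Prop := ∀ (courses : List (String × String)) (duplicates : List (String × List String)), Dom_fixDuplicates courses duplicates → Spec_fixDuplicates courses duplicates (fixDuplicates courses duplicates)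

-- ===== LEMMAS AND PROOFS =====

-- occurrence list with natural indices: all i < |s| with s.startswith(d, i)
def pvOccList (s d : List Char) : List Nat :=
  (List.range s.length).filter (fun i => PySem.Chars.startswith (List.drop i s) d)

-- A's comprehension over range(len(conditions)) is the full occurrence list, as Ints
lemma pvResA_eq (s d : String) :
    (PySem.List.pyRange 0 (PySem.Str.len s) 1).filter
      (fun i => PySem.Str.startswith (PySem.Str.slice s (some i) none) d)
    = (pvOccList s.toList d.toList).map (fun k : Nat => (k : Int)) := by
  rw [PySem.List.pyRange_one]
  simp only [PySem.Str.len_eq]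
  rw [List.filter_map]
  have hn : (((s.toList.length : Int)) - 0).toNat = s.toList.length := by omega
  rw [hn]
  unfold pvOccList
  have hpred : ((fun i : Int => PySem.Str.startswith (PySem.Str.slice s (some i) none) d) ∘
      (fun k : Nat => (0 : Int) + ↑k)) =
      (fun i : Nat => PySem.Chars.startswith (List.drop i s.toList) d.toList) := by
    funext k
    simp only [Function.comp, zero_add]
    rw [PySem.Str.startswith_eq, PySem.Str.toList_slice, PySem.Chars.slice_eq_listSlice,
        PySem.List.slice_from_natCast]
  have hf : (fun k : Nat => (0 : Int) + ↑k) = (fun k : Nat => ((k : Int))) := by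
    funext k
    ring
  rw [hpred, hf]

lemma pvM_pos : (0 : Int) < pvM := by unfold pvM; norm_num

lemma pvMod_eq (x : Int) : PySem.Int.mod x pvM = x % pvM :=
  PySem.Int.mod_eq_emod_of_pos pvM_pos

lemma pvMod_modeq (x : Int) : PySem.Int.mod x pvM ≡ x [ZMOD pvM] := by
  rw [pvMod_eq]
  exact Int.emod_emod_of_dvd x dvd_rfl

-- folding from seed h is (mod pvM) the seed shifted past the block plus the block's own hash
lemma pvHash_modeq (l : List Char) (h : Int) :
    pvHashF h l ≡ h * 131 ^ l.length + pvHashF 0 l [ZMOD pvM] := by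
  induction l generalizing h with
  | nil => simp [pvHashF]
  | cons c t ih =>
    have key : ∀ g : Int, pvHashF g (c :: t) ≡ (g * 131 + (c.toNat : Int)) * 131 ^ t.length + pvHashF 0 t [ZMOD pvM] := by
      intro g
      have e : pvHashF g (c :: t) = pvHashF (PySem.Int.mod (g * 131 + (c.toNat : Int)) pvM) t := rfl
      rw [e]
      exact (ih _).trans (Int.ModEq.add_right _ ((pvMod_modeq _).mul_right _))
    have hB : pvHashF 0 (c :: t) ≡ (c.toNat : Int) * 131 ^ t.length + pvHashF 0 t [ZMOD pvM] := by
      simpa using key 0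
    calc pvHashF h (c :: t)
        ≡ (h * 131 + (c.toNat : Int)) * 131 ^ t.length + pvHashF 0 t [ZMOD pvM] := key h
      _ = h * 131 ^ (t.length + 1) + ((c.toNat : Int) * 131 ^ t.length + pvHashF 0 t) := by ring
      _ ≡ h * 131 ^ (t.length + 1) + pvHashF 0 (c :: t) [ZMOD pvM] := (hB.symm).add_left _
      _ = h * 131 ^ (c :: t).length + pvHashF 0 (c :: t) := by simp

lemma pvHash_cons_modeq (c : Char) (t : List Char) :
    pvHashF 0 (c :: t) ≡ (c.toNat : Int) * 131 ^ t.length + pvHashF 0 t [ZMOD pvM] := by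
  have e : pvHashF 0 (c :: t) = pvHashF (PySem.Int.mod (0 * 131 + (c.toNat : Int)) pvM) t := rfl
  have hc : PySem.Int.mod (0 * 131 + (c.toNat : Int)) pvM ≡ (c.toNat : Int) [ZMOD pvM] := by
    simpa using pvMod_modeq (0 * 131 + (c.toNat : Int))
  rw [e]
  exact (pvHash_modeq t _).trans (Int.ModEq.add_right _ (hc.mul_right _))

lemma pvHash_append (h : Int) (l : List Char) (y : Char) :
    pvHashF h (l ++ [y]) = PySem.Int.mod (pvHashF h l * 131 + (y.toNat : Int)) pvM := by
  simp [pvHashF, List.foldl_append]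

-- the rolling-hash update: drop the leading char, append the next one
lemma pvRoll (c y : Char) (t : List Char) :
    PySem.Int.mod ((pvHashF 0 (c :: t) - (c.toNat : Int) * PySem.Int.powMod 131 t.length pvM) * 131 + (y.toNat : Int)) pvM
      = pvHashF 0 (t ++ [y]) := by
  rw [pvHash_append, pvMod_eq, pvMod_eq]
  have hpw : PySem.Int.powMod 131 t.length pvM ≡ 131 ^ t.length [ZMOD pvM] := pvMod_modeq _
  have h1 : pvHashF 0 (c :: t) - (c.toNat : Int) * PySem.Int.powMod 131 t.length pvM
      ≡ ((c.toNat : Int) * 131 ^ t.length + pvHashF 0 t) - (c.toNat : Int) * 131 ^ t.length [ZMOD pvM] :=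
    (pvHash_cons_modeq c t).sub (hpw.mul_left _)
  have h2 : (pvHashF 0 (c :: t) - (c.toNat : Int) * PySem.Int.powMod 131 t.length pvM) * 131 + (y.toNat : Int)
      ≡ pvHashF 0 t * 131 + (y.toNat : Int) [ZMOD pvM] := by
    have := (h1.mul_right 131).add_right ((y.toNat : Int))
    calc (pvHashF 0 (c :: t) - (c.toNat : Int) * PySem.Int.powMod 131 t.length pvM) * 131 + (y.toNat : Int)
        ≡ (((c.toNat : Int) * 131 ^ t.length + pvHashF 0 t) - (c.toNat : Int) * 131 ^ t.length) * 131 + (y.toNat : Int) [ZMOD pvM] := this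
      _ = pvHashF 0 t * 131 + (y.toNat : Int) := by ring
  exact h2

-- invariant of Source B's sliding loop: after k iterations, occ holds every hit below k and
-- h is the hash of the window at position min k (n-m)
lemma pvFold_spec (s d : List Char) (hm : 0 < d.length) (hnm : d.length ≤ s.length)
    (k : Nat) (hk : k ≤ s.length - d.length + 1) :
    (List.range k).foldl (pvRkStep s d (pvHashF 0 d) (PySem.Int.powMod 131 (d.length - 1) pvM))
        (pvHashF 0 (s.take d.length), ([] : List Int)) =
      (pvHashF 0 ((s.drop (min k (s.length - d.length))).take d.length),
       ((List.range k).filter (fun i => (s.drop i).take d.length == d)).map (fun i : Nat => (i : Int))) := by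
  induction k with
  | zero => simp
  | succ k ih =>
    have hk' : k ≤ s.length - d.length := by omega
    rw [List.range_succ, List.foldl_append, List.filter_append, List.map_append,
        ih (by omega), Nat.min_eq_left hk']
    simp only [List.foldl_cons, List.foldl_nil]
    unfold pvRkStep
    have hcond : ((pvHashF 0 ((s.drop k).take d.length) == pvHashF 0 d) && ((s.drop k).take d.length == d))
        = ((s.drop k).take d.length == d) := by
      by_cases hw : (s.drop k).take d.length = d
      · simp [hw]
      · simp [hw]
    refine Prod.ext ?_ ?_
    · -- the hash component
      by_cases hlt : k + d.length < s.length
      · rw [if_pos hlt, Nat.min_eq_left (by omega)]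
        obtain ⟨m', hm'⟩ : ∃ m', d.length = m' + 1 := ⟨d.length - 1, by omega⟩
        have hkn : k < s.length := by omega
        have hdropk : s.drop k = s.getD k ' ' :: s.drop (k + 1) := by
          rw [List.getD_eq_getElem s ' ' hkn]
          exact List.drop_eq_getElem_cons hkn
        have hwk : (s.drop k).take d.length = s.getD k ' ' :: (s.drop (k + 1)).take m' := by
          rw [hdropk, hm', List.take_succ_cons]
        have htlen : ((s.drop (k + 1)).take m').length = m' := by
          simp only [List.length_take, List.length_drop]
          omega
        have hwk1 : (s.drop (k + 1)).take d.length
            = (s.drop (k + 1)).take m' ++ [s.getD (k + d.length) ' '] := by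
          have hkm : k + d.length < s.length := hlt
          have hidx : (s.drop (k + 1))[m']? = some (s.getD (k + d.length) ' ') := by
            rw [List.getElem?_drop, List.getD_eq_getElem s ' ' hkm]
            have : k + 1 + m' = k + d.length := by omega
            rw [this, List.getElem?_eq_getElem hkm]
          rw [hm', List.take_add_one, hidx]
          simp [hm']
        have hr := pvRoll (s.getD k ' ') (s.getD (k + d.length) ' ') ((s.drop (k + 1)).take m')
        rw [htlen, hm'] at hr
        rw [hwk, hwk1]
        simp only [hm', Nat.add_sub_cancel]
        exact hr
      · have hkeq : k + d.length = s.length := by omega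
        rw [if_neg hlt, show min (k + 1) (s.length - d.length) = k from by omega]
    · -- the occurrence component
      simp only [hcond, List.filter_cons, List.filter_nil]
      by_cases hw : ((s.drop k).take d.length == d) = true
      · simp [hw]
      · simp [hw]

-- B's occurrence routine computes exactly A's occurrence list
lemma pvOccurrences_eq (s d : List Char) :
    pvOccurrences s d = (pvOccList s d).map (fun i : Nat => (i : Int)) := by
  unfold pvOccurrences pvOccList
  by_cases hm : d.length = 0
  · rw [if_pos (by simpa using hm)]
    have hd0 : d = [] := List.length_eq_zero_iff.mp hm
    have hfil : (List.range s.length).filter (fun i => PySem.Chars.startswith (List.drop i s) d) = List.range s.length := by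
      apply List.filter_eq_self.mpr
      intro i _
      exact (PySem.Chars.startswith_iff _ _).mpr (by simp [hd0])
    rw [hfil, PySem.List.pyRange_one]
    have : ((s.length : Int) - 0).toNat = s.length := by omega
    rw [this]
    simp
  · rw [if_neg (by simpa using hm)]
    by_cases hnm : s.length < d.length
    · rw [if_pos hnm]
      have hfil : (List.range s.length).filter (fun i => PySem.Chars.startswith (List.drop i s) d) = [] := by
        apply List.filter_eq_nil_iff.mpr
        intro i _ hsw
        have hp := (PySem.Chars.startswith_iff _ _).mp hsw
        have := hp.length_le
        simp only [List.length_drop] at this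
        omega
      rw [hfil]
      rfl
    · rw [if_neg hnm]
      have hnm' : d.length ≤ s.length := by omega
      rw [pvFold_spec s d (by omega) hnm' (s.length - d.length + 1) le_rfl]
      simp only []
      congr 1
      have hsplit : List.range s.length
          = List.range (s.length - d.length + 1) ++ (List.range (d.length - 1)).map (fun j => (s.length - d.length + 1) + j) := by
        conv_lhs => rw [show s.length = (s.length - d.length + 1) + (d.length - 1) from by omega, List.range_add]
      rw [hsplit, List.filter_append]
      have hnil : ((List.range (d.length - 1)).map (fun j => (s.length - d.length + 1) + j)).filter
          (fun i => PySem.Chars.startswith (List.drop i s) d) = [] := by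
        apply List.filter_eq_nil_iff.mpr
        intro i hi hsw
        rcases List.mem_map.mp hi with ⟨j, hj, rfl⟩
        have hjlt := List.mem_range.mp hj
        have hp := (PySem.Chars.startswith_iff _ _).mp hsw
        have := hp.length_le
        simp only [List.length_drop] at this
        omega
      rw [hnil, List.append_nil]
      congr 1
      funext i
      have hiff : (PySem.Chars.startswith (List.drop i s) d = true)
          ↔ ((List.take d.length (List.drop i s) == d) = true) := by
        rw [PySem.Chars.startswith_iff, beq_iff_eq, List.prefix_iff_eq_take, eq_comm]
      exact (Bool.eq_iff_iff.mpr hiff).symm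

-- the inner per-duplicate step of A equals that of B
lemma pv_inner_eq (c : String) (conds : String) (fixed : PySem.Dict String String) (dup : String) :
    (let res := (PySem.List.pyRange 0 (PySem.Str.len conds) 1).filter
        (fun i => PySem.Str.startswith (PySem.Str.slice conds (some i) none) dup)
      if res.length == 2 then
        fixed.insert c (PySem.Str.slice conds none (some (PySem.List.pyGetD res 0 0)) ++
                        PySem.Str.slice conds (some (PySem.List.pyGetD res 1 0)) none)
      else fixed) =
    (let occ := pvOccurrences conds.toList dup.toList
      if occ.length == 2 then
        fixed.insert c (PySem.Str.slice conds none (some (PySem.List.pyGetD occ 0 0)) ++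
                        PySem.Str.slice conds (some (PySem.List.pyGetD occ 1 0)) none)
      else fixed) := by
  rw [pvOccurrences_eq, pvResA_eq]

lemma pv_foldl_congr {α β : Type} {f g : α → β → α} {l : List β} {a : α}
    (h : ∀ x y, f x y = g x y) : l.foldl f a = l.foldl g a := by
  have hfg : f = g := funext fun x => funext fun y => h x y
  rw [hfg]

-- ===== VERDICT (by name: the statement is the Claim_ definition above) =====
theorem fixDuplicates_spec : Claim_equal_fixDuplicates := by
  intro courses duplicates _
  unfold Spec_fixDuplicates fixDuplicates fixDuplicates_alt
  simp only []
  congr 1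
  apply pv_foldl_congr
  intro fixed p
  cases hget : (PySem.Dict.ofList duplicates).get? p.1 with
  | none =>
    rw [PySem.Dict.getD, hget]
    rfl
  | some ds =>
    rw [PySem.Dict.getD, hget]
    simp only [Option.getD_some]
    apply pv_foldl_congr
    intro acc dup
    exact pv_inner_eq p.1 p.2 acc dup
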